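-- pv_equiv track=rewrite | github.com/DEC4F/Leetcode-Sol | 1400. Construct K Palindrome Strings/CanConstruct.py | canConstruct
-- ===== SOURCE A (Python) =====
-- from collections import Counter
--
-- def canConstruct(s: str, k: int) -> bool:
--     """
--     T(n) = O(n)
--     S(n) = O(1) -- only 26 letters
--     """
--     if k > len(s):
--         return False
--     C = Counter(s)
--     n_leftover = 0
--     for cnt in C.values():
--         if cnt % 2 != 0:
--             n_leftover += 1
--     return n_leftover <= k
-- ===== SOURCE B (Python) =====
-- def canConstruct(s: str, k: int) -> bool:
--     if k > len(s):
--         return False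
--     t = sorted(s)
--     n = len(t)
--     unpaired = 0
--     i = 0
--     while i < n:
--         if i + 1 < n and t[i] == t[i + 1]:
--             i += 2
--         else:
--             unpaired += 1
--             i += 1
--     return unpaired <= k
-- ===== Notes on version B (the rewrite author's own statement) =====
-- stated objective: alternative
-- what changed: Sorts the string and greedily cancels adjacent equal pairs in one scan, counting the leftover unpaired characters (exactly the characters with odd multiplicity), instead of building a Counter and scanning its values for odd counts.
import Mathlib
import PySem

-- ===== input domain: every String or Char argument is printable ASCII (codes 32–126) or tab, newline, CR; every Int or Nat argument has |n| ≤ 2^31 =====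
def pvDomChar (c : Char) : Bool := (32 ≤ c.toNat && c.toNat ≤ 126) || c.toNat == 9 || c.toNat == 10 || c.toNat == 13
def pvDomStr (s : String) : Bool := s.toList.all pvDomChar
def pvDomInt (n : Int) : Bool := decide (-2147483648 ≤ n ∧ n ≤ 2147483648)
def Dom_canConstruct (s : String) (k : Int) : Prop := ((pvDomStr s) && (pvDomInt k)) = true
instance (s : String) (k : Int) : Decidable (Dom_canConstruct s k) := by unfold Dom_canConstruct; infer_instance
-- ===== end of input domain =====

-- B sorts the string and greedily cancels adjacent equal pairs in one scan,
-- counting leftover unpaired characters, instead of A's Counter-then-scan-values.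

-- ===== PORT A =====
def canConstruct (s : String) (k : Int) : Bool :=
  if k > PySem.Str.len s then false
  else
    let C := PySem.Dict.counter s.toList
    let n := C.values.foldl
      (fun acc cnt => if PySem.Int.mod cnt 2 ≠ 0 then acc + 1 else acc) (0 : Int)
    decide (n ≤ k)

-- ===== PORT B =====
-- the while loop of Source B: consume two equal adjacent chars, or one unpaired char
def pvUnpaired : List Char → Int
  | [] => 0
  | [_] => 1
  | x :: y :: rest => if x == y then pvUnpaired rest else 1 + pvUnpaired (y :: rest)

def canConstruct_alt (s : String) (k : Int) : Bool :=
  if k > PySem.Str.len s then false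
  else
    let t := PySem.List.sorted s.toList (fun c => c) false
    decide (pvUnpaired t ≤ k)

-- ===== PRECONDITION & SPEC =====
def Spec_canConstruct (s : String) (k : Int) (out : Bool) : Prop := out = canConstruct_alt s k
instance (s : String) (k : Int) (out : Bool) : Decidable (Spec_canConstruct s k out) := by unfold Spec_canConstruct; infer_instance

-- ===== CLAIM (what is proved, stated in full; the proofs are below) =====
def Claim_equal_canConstruct : Prop := ∀ (s : String) (k : Int), Dom_canConstruct s k → Spec_canConstruct s k (canConstruct s k)

-- ===== LEMMAS AND PROOFS =====

-- the number of characters of odd multiplicity in l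
def pvOdd (l : List Char) : Nat :=
  ((l.toFinset).filter (fun c => l.count c % 2 = 1)).card

-- Python's cnt % 2 on a natural count, as a parity test
theorem pvMod_two (n : Nat) : (PySem.Int.mod (n : Int) 2 ≠ 0) ↔ n % 2 = 1 := by
  rw [PySem.Int.mod_eq_emod_of_pos (by norm_num)]
  omega

-- A's odd-count tally equals pvOdd
theorem pvA_core (l : List Char) :
    (PySem.Dict.counter l).values.foldl
        (fun acc cnt => if PySem.Int.mod cnt 2 ≠ 0 then acc + 1 else acc) (0 : Int)
      = (pvOdd l : Int) := by
  rw [PySem.List.foldl_ite_add_one]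
  have hv : (PySem.Dict.counter l).values
      = (PySem.Set.ofList l).map (fun c => (l.count c : Int)) := by
    show ((PySem.Dict.counter l).items).map (·.2) = _
    rw [PySem.Dict.items_counter]
    simp [List.map_map, Function.comp]
  rw [hv, List.countP_map, zero_add]
  have hcp : (PySem.Set.ofList l).countP
      ((fun cnt => decide (PySem.Int.mod cnt 2 ≠ 0)) ∘ fun c => (l.count c : Int))
      = (pvOdd l) := by
    have hnd := PySem.Set.nodup_ofList l
    rw [List.countP_eq_length_filter, pvOdd]
    have hfs : ((PySem.Set.ofList l).filter
        ((fun cnt => decide (PySem.Int.mod cnt 2 ≠ 0)) ∘ fun c => (l.count c : Int))).toFinset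
        = (l.toFinset).filter (fun c => l.count c % 2 = 1) := by
      ext x
      simp only [List.mem_toFinset, List.mem_filter, Finset.mem_filter,
        PySem.Set.mem_ofList, Function.comp]
      constructor
      · rintro ⟨h1, h2⟩
        rw [decide_eq_true_iff, pvMod_two] at h2
        exact ⟨h1, h2⟩
      · rintro ⟨h1, h2⟩
        exact ⟨h1, by rw [decide_eq_true_iff, pvMod_two]; exact h2⟩
    rw [← hfs, List.toFinset_card_of_nodup (hnd.filter _)]
  omega

-- B's greedy pair-cancellation on a sorted list leaves exactly the odd-multiplicity chars
theorem pvB_core (t : List Char) (hs : t.Pairwise (· ≤ ·)) :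
    pvUnpaired t = (pvOdd t : Int) := by
  induction t using pvUnpaired.induct with
  | case1 =>
      simp [pvUnpaired, pvOdd]
  | case2 x =>
      unfold pvUnpaired pvOdd
      simp [Finset.filter_singleton]
  | case3 x y rest heq ih =>
      -- x == y : both cancelled
      have hxy : x = y := by simpa using heq
      subst hxy
      rw [pvUnpaired, if_pos (by simp)]
      have hrest : rest.Pairwise (· ≤ ·) := (hs.sublist (by simp))
      rw [ih hrest]
      -- pvOdd (x :: x :: rest) = pvOdd rest
      have hpar : ∀ a ∈ rest.toFinset,
          ((x :: x :: rest).count a % 2 = 1) ↔ (rest.count a % 2 = 1) := by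
        intro a _
        rcases eq_or_ne a x with rfl | hax
        · simp
          omega
        · simp [Ne.symm hax]
      have hodd : pvOdd (x :: x :: rest) = pvOdd rest := by
        unfold pvOdd
        by_cases hx : x ∈ rest
        · have hts : (x :: x :: rest).toFinset = rest.toFinset := by
            simp [List.toFinset_cons,
              Finset.insert_eq_self.mpr (List.mem_toFinset.mpr hx)]
          rw [hts, Finset.filter_congr hpar]
        · have hts : (x :: x :: rest).toFinset = insert x rest.toFinset := by
            simp [List.toFinset_cons]
          rw [hts, Finset.filter_insert]
          have hcx : (x :: x :: rest).count x = 2 := by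
            simp [List.count_eq_zero_of_not_mem hx]
          rw [if_neg (by simp [hcx])]
          rw [Finset.filter_congr hpar]
      rw [hodd]
  | case4 x y rest heq ih =>
      -- x ≠ y and sorted ⇒ x appears exactly once
      have hxy : x ≠ y := by simpa using heq
      rw [pvUnpaired, if_neg (by simpa using hxy)]
      have htail : (y :: rest).Pairwise (· ≤ ·) := hs.sublist (by simp)
      rw [ih htail]
      have hxle : ∀ z ∈ y :: rest, x ≤ z := fun z hz => (List.pairwise_cons.mp hs).1 z hz
      have hxlt : ∀ z ∈ y :: rest, x < z := by
        intro z hz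
        rcases List.mem_cons.mp hz with rfl | hz'
        · exact lt_of_le_of_ne (hxle z (by simp)) hxy
        · have hyz : y ≤ z := (List.pairwise_cons.mp htail).1 z hz'
          exact lt_of_lt_of_le (lt_of_le_of_ne (hxle y (by simp)) hxy) hyz
      have hxmem : x ∉ y :: rest := fun h => absurd (hxlt x h) (lt_irrefl x)
      -- pvOdd (x :: y :: rest) = 1 + pvOdd (y :: rest)
      have hodd : pvOdd (x :: y :: rest) = 1 + pvOdd (y :: rest) := by
        unfold pvOdd
        have hts : (x :: y :: rest).toFinset = insert x (y :: rest).toFinset := by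
          simp [List.toFinset_cons]
        rw [hts, Finset.filter_insert]
        have hcx : (x :: y :: rest).count x = 1 := by
          simp [List.count_eq_zero_of_not_mem hxmem]
        rw [if_pos (by simp [hcx])]
        rw [Finset.card_insert_of_notMem (by
          simp only [Finset.mem_filter, List.mem_toFinset]
          rintro ⟨h1, _⟩; exact hxmem h1)]
        have hpar : ∀ a ∈ (y :: rest).toFinset,
            ((x :: y :: rest).count a % 2 = 1) ↔ ((y :: rest).count a % 2 = 1) := by
          intro a ha
          have hax : a ≠ x := by
            rintro rfl; exact hxmem (List.mem_toFinset.mp ha)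
          simp [List.count_cons, Ne.symm hax]
        rw [Finset.filter_congr hpar]
        omega
      rw [hodd]; push_cast; ring

-- pvOdd is invariant under permutation
theorem pvOdd_perm {l t : List Char} (h : t.Perm l) : pvOdd t = pvOdd l := by
  unfold pvOdd
  have hts : t.toFinset = l.toFinset := by
    ext z; simp [List.mem_toFinset, h.mem_iff]
  have hc : ∀ a, t.count a = l.count a := fun a => h.count_eq a
  simp only [hts, hc]

-- ===== VERDICT (by name: the statement is the Claim_ definition above) =====
theorem canConstruct_spec : Claim_equal_canConstruct := by
  intro s k _
  unfold Spec_canConstruct canConstruct canConstruct_alt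
  split
  · rfl
  · simp only [pvA_core]
    rw [pvB_core _ (PySem.List.sorted_pairwise s.toList (fun c => c) ),
      pvOdd_perm (PySem.List.sorted_perm s.toList (fun c => c) false)]
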